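-- pv_equiv track=rewrite | github.com/JernejHabjan/School | FRI/Programing/Python/2Letnik/AIPS2/Dn05/min__subset_diff.py | getsumDifference
-- ===== SOURCE A (Python) =====
-- def getsumDifference(array_2d):
--     # returns difference between all arrays - O(n^2)
--     diff = 0
--     for i in range(len(array_2d)):
--         sum_arr1 = sum(array_2d[i])
--         for j in range(len(array_2d)):
--             sum_arr2 = sum(array_2d[j])
--             diff += abs(sum_arr1 - sum_arr2)
--     return diff
-- ===== SOURCE B (Python) =====
-- def getsumDifference(array_2d):
--     # sum row sums' pairwise absolute differences via sort + running prefix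
--     sums = sorted(sum(row) for row in array_2d)
--     total = 0
--     prefix = 0
--     count = 0
--     for s in sums:
--         total += 2 * (count * s - prefix)
--         prefix += s
--         count += 1
--     return total
-- ===== Notes on version B (the rewrite author's own statement) =====
-- stated objective: faster
-- what changed: Instead of the O(n^2) double loop re-summing each row, B computes each row sum once, sorts the sums, and accumulates the total of pairwise absolute differences in one pass with a running prefix sum.
import Mathlib
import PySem

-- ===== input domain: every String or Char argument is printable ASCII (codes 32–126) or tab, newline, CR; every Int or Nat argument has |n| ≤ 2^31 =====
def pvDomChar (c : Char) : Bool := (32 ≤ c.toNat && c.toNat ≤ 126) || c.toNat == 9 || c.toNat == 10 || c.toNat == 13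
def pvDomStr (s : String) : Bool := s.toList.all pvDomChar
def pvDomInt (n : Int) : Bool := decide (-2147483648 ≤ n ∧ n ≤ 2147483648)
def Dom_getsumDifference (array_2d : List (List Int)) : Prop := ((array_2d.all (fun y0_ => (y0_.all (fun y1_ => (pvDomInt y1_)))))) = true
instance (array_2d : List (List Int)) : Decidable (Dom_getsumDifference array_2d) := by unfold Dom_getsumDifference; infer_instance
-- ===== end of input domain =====

-- B replaces A's quadratic double loop (which re-sums rows) by: sum each row once,
-- sort the sums, one pass with a running prefix sum — an asymptotically faster algorithm.


-- ===== PORT A =====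
def getsumDifference (array_2d : List (List Int)) : Int :=
  (PySem.List.pyRange 0 array_2d.length 1).foldl (fun diff i =>
    let sum_arr1 := (PySem.List.pyGetD array_2d i []).sum
    (PySem.List.pyRange 0 array_2d.length 1).foldl (fun diff j =>
      let sum_arr2 := (PySem.List.pyGetD array_2d j []).sum
      diff + |sum_arr1 - sum_arr2|) diff) 0

-- ===== PORT B =====
def getsumDifference_alt (array_2d : List (List Int)) : Int :=
  let sums := PySem.List.sorted (array_2d.map (fun row => row.sum)) (fun x => x) false
  let st := sums.foldl
    (fun (st : Int × Int × Int) s =>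
      (st.1 + 2 * (st.2.2 * s - st.2.1), st.2.1 + s, st.2.2 + 1)) (0, 0, 0)
  st.1

-- ===== PRECONDITION & SPEC =====
def Spec_getsumDifference (array_2d : List (List Int)) (out : Int) : Prop := out = getsumDifference_alt array_2d
instance (array_2d : List (List Int)) (out : Int) : Decidable (Spec_getsumDifference array_2d out) := by unfold Spec_getsumDifference; infer_instance

-- ===== CLAIM (what is proved, stated in full; the proofs are below) =====
def Claim_equal_getsumDifference : Prop := ∀ (array_2d : List (List Int)), Dom_getsumDifference array_2d → Spec_getsumDifference array_2d (getsumDifference array_2d)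

-- ===== LEMMAS AND PROOFS =====

/-- total of all ordered-pair absolute differences of the elements of `l` -/
def pvT (l : List Int) : Int :=
  (l.map (fun x => (l.map (fun y => |x - y|)).sum)).sum

/-- B's loop step -/
def pvStep (st : Int × Int × Int) (s : Int) : Int × Int × Int :=
  (st.1 + 2 * (st.2.2 * s - st.2.1), st.2.1 + s, st.2.2 + 1)

theorem sum_map_add_int (l : List Int) (f g : Int → Int) :
    (l.map (fun a => f a + g a)).sum = (l.map f).sum + (l.map g).sum := by
  induction l with
  | nil => simp
  | cons x xs ih => simp [ih]; ring

theorem A_eq_T (a : List (List Int)) :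
    getsumDifference a = pvT (a.map (fun r => r.sum)) := by
  unfold getsumDifference pvT
  have hinner : ∀ (s1 diff : Int),
      (PySem.List.pyRange 0 (a.length : Int) 1).foldl (fun d j =>
        d + |s1 - (PySem.List.pyGetD a j []).sum|) diff
      = diff + (a.map (fun r => |s1 - r.sum|)).sum := by
    intro s1 diff
    rw [PySem.List.foldl_pyRange_zero_pyGetD' a [] (fun d row => d + |s1 - row.sum|) diff]
    rw [PySem.List.foldl_add]
  simp only [hinner]
  rw [PySem.List.foldl_pyRange_zero_pyGetD' a []
    (fun diff row => diff + (a.map (fun r => |row.sum - r.sum|)).sum) 0]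
  rw [PySem.List.foldl_add]
  simp [List.map_map, Function.comp_def]

theorem T_perm {l l' : List Int} (h : l.Perm l') : pvT l = pvT l' := by
  unfold pvT
  have hinner : ∀ x : Int, (l.map (fun y => |x - y|)).sum = (l'.map (fun y => |x - y|)).sum :=
    fun x => (h.map _).sum_eq
  calc (l.map (fun x => (l.map (fun y => |x - y|)).sum)).sum
      = (l.map (fun x => (l'.map (fun y => |x - y|)).sum)).sum := by
        simp only [hinner]
    _ = (l'.map (fun x => (l'.map (fun y => |x - y|)).sum)).sum := (h.map _).sum_eq

theorem sum_abs_of_le (x : Int) (xs : List Int) (h : ∀ y ∈ xs, x ≤ y) :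
    (xs.map (fun y => |x - y|)).sum = xs.sum - xs.length * x := by
  induction xs with
  | nil => simp
  | cons y ys ih =>
    have hy : x ≤ y := h y (by simp)
    have : |x - y| = y - x := by rw [abs_sub_comm]; exact abs_of_nonneg (by omega)
    simp [this, ih (fun z hz => h z (by simp [hz]))]
    ring

theorem T_cons_min (x : Int) (xs : List Int) (h : ∀ y ∈ xs, x ≤ y) :
    pvT (x :: xs) = pvT xs + 2 * (xs.sum - xs.length * x) := by
  unfold pvT
  simp only [List.map_cons, List.sum_cons, sub_self, abs_zero]
  have h1 : (xs.map (fun y => |x - y|)).sum = xs.sum - xs.length * x := sum_abs_of_le x xs h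
  have h2 : (xs.map (fun z => |z - x| + (xs.map (fun y => |z - y|)).sum)).sum
      = (xs.map (fun z => |z - x|)).sum + (xs.map (fun z => (xs.map (fun y => |z - y|)).sum)).sum :=
    sum_map_add_int xs _ _
  have h3 : (xs.map (fun z => |z - x|)).sum = xs.sum - xs.length * x := by
    have := sum_abs_of_le x xs h
    calc (xs.map (fun z => |z - x|)).sum = (xs.map (fun z => |x - z|)).sum := by
          simp only [abs_sub_comm]
      _ = xs.sum - xs.length * x := this
  rw [h2, h1, h3]
  ring

theorem fold_shift (l : List Int) : ∀ t p c : Int,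
    (l.foldl pvStep (t, p, c)).1
      = t + 2 * (c * l.sum - l.length * p) + (l.foldl pvStep (0, 0, 0)).1 := by
  induction l with
  | nil => intro t p c; simp
  | cons x xs ih =>
    intro t p c
    simp only [List.foldl_cons, pvStep]
    rw [ih, ih (0 + 2 * (0 * x - 0)) (0 + x) (0 + 1)]
    simp only [List.sum_cons, List.length_cons]
    push_cast; ring

theorem G0_eq_T (l : List Int) (h : l.Pairwise (· ≤ ·)) :
    (l.foldl pvStep (0, 0, 0)).1 = pvT l := by
  induction l with
  | nil => simp [pvT]
  | cons x xs ih =>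
    have hx : ∀ y ∈ xs, x ≤ y := fun y hy => (List.pairwise_cons.mp h).1 y hy
    have hxs := (List.pairwise_cons.mp h).2
    simp only [List.foldl_cons, pvStep]
    rw [fold_shift]
    rw [ih hxs, T_cons_min x xs hx]
    push_cast; ring

-- ===== VERDICT (by name: the statement is the Claim_ definition above) =====
theorem getsumDifference_spec : Claim_equal_getsumDifference := by
  intro a _
  unfold Spec_getsumDifference getsumDifference_alt
  have hfold : ∀ (l : List Int) (st : Int × Int × Int),
      l.foldl (fun (st : Int × Int × Int) s =>
        (st.1 + 2 * (st.2.2 * s - st.2.1), st.2.1 + s, st.2.2 + 1)) st = l.foldl pvStep st := by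
    intro l st; rfl
  rw [A_eq_T]
  simp only [hfold]
  rw [G0_eq_T _ (by simpa using PySem.List.sorted_pairwise (a.map (fun r => r.sum)) (fun x => x))]
  exact (T_perm (PySem.List.sorted_perm _ _ _)).symm
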